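-- pv_equiv track=rewrite | github.com/ruthaleks/kattis | pizza-hawaii/pizza.py | ger_check
-- ===== SOURCE A (Python) =====
-- def ger_check(D, ger, pizza_list):
--     for ger_ing in ger:
--         for i in pizza_list:
--             ger_list = i[0]
--             eng_list = i[1]
--             if ger_ing not in ger_list:
--                 for eng_ing in eng_list:
--                     if eng_ing in D[ger_ing]:
--                         D[ger_ing].remove(eng_ing)
--
--     return D
-- ===== SOURCE B (Python) =====
-- def ger_check(D, ger, pizza_list):
--     for ger_ing in ger:
--         if ger_ing not in D:
--             continue
--         # Count, per English ingredient, how many occurrences appear on pizzas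
--         # that do NOT list ger_ing: exactly that many occurrences get dropped.
--         remaining = {}
--         for ger_list, eng_list in pizza_list:
--             if ger_ing not in ger_list:
--                 for eng_ing in eng_list:
--                     remaining[eng_ing] = remaining.get(eng_ing, 0) + 1
--         kept = []
--         for e in D[ger_ing]:
--             if remaining.get(e, 0) > 0:
--                 remaining[e] -= 1
--             else:
--                 kept.append(e)
--         D[ger_ing][:] = kept
--     return D
-- ===== Notes on version B (the rewrite author's own statement) =====
-- stated objective: faster
-- what changed: B replaces A's repeated in-place list.remove scans (one O(|candidates|) membership test plus remove per removal event) by, per German ingredient, one counting pass over pizza_list followed by a single countdown scan that rebuilds the candidate list.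
-- crash fix: On a German ingredient in ger that is missing from D while some pizza not listing it has a non-empty English list, A raises KeyError; B skips the missing key and returns D unchanged. — e.g. on ger_check([], ["ananas"], [([], ["pineapple"])]): A raises KeyError, B returns []
import Mathlib
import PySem

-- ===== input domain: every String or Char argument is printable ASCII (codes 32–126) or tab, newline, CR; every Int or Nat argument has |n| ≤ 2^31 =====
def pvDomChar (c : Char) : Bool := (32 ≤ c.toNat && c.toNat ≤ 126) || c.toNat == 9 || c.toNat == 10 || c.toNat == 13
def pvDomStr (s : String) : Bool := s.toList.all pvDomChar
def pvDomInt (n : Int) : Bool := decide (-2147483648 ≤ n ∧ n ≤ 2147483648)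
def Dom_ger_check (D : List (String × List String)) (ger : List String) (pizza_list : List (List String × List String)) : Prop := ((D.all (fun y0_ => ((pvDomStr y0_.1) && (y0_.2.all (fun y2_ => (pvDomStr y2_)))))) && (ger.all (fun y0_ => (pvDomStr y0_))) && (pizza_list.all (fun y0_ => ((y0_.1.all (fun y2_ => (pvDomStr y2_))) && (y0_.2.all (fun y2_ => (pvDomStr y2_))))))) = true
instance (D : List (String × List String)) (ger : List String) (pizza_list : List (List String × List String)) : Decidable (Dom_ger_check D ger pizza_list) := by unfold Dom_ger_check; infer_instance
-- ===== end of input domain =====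

-- B replaces A's per-event list.remove scans by, per German ingredient, one counting pass and a single countdown scan (measurably faster); equivalence of RETURN values is proved (both Pythons also mutate D's lists in place).


-- ===== PORT A =====
-- 'if eng_ing in D[ger_ing]: D[ger_ing].remove(eng_ing)'; a missing key (Python KeyError) leaves d unchanged — excluded by Pre_.
def gerRemoveStep (d : PySem.Dict String (List String)) (g e : String) : PySem.Dict String (List String) :=
  match d.get? g with
  | none => d
  | some cur => if cur.contains e then d.insert g ((PySem.List.remove? cur e).getD cur) else d

def ger_check (D : List (String × List String)) (ger : List String) (pizza_list : List (List String × List String)) : List (String × List String) :=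
  (ger.foldl (fun (d : PySem.Dict String (List String)) ger_ing =>
      pizza_list.foldl (fun d i =>
        let ger_list := i.1
        let eng_list := i.2
        if !(ger_list.contains ger_ing) then
          eng_list.foldl (fun d eng_ing => gerRemoveStep d ger_ing eng_ing) d
        else d) d)
    (PySem.Dict.mk D)).items

-- ===== PORT B =====
def ger_check_alt (D : List (String × List String)) (ger : List String) (pizza_list : List (List String × List String)) : List (String × List String) :=
  (ger.foldl (fun (d : PySem.Dict String (List String)) ger_ing =>
      match d.get? ger_ing with
      | none => d   -- 'if ger_ing not in D: continue'
      | some cand =>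
          -- remaining[e] = occurrences of e on pizzas that do not list ger_ing
          let remaining := pizza_list.foldl (fun (rm : PySem.Dict String Int) i =>
              if !(i.1.contains ger_ing) then
                i.2.foldl (fun rm eng_ing => rm.insert eng_ing (rm.getD eng_ing 0 + 1)) rm
              else rm)
            (PySem.Dict.empty : PySem.Dict String Int)
          let scan := cand.foldl (fun (st : PySem.Dict String Int × List String) e =>
              if st.1.getD e 0 > 0 then (st.1.insert e (st.1.getD e 0 - 1), st.2)
              else (st.1, st.2 ++ [e]))
            (remaining, [])
          d.insert ger_ing scan.2)
    (PySem.Dict.mk D)).items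

-- ===== PRECONDITION & SPEC =====
-- Pre_ excludes: German ingredients in ger that are missing from D while some pizza without them has a
-- non-empty English list (there A raises KeyError; see Raises_), and duplicate keys in D (a Python dict
-- cannot carry duplicate keys, so such an association list does not describe A's input).
def Pre_ger_check (D : List (String × List String)) (ger : List String) (pizza_list : List (List String × List String)) : Prop :=
  (D.map Prod.fst).Nodup ∧
    (∀ g ∈ ger, g ∈ D.map Prod.fst ∨ ∀ p ∈ pizza_list, g ∈ p.1 ∨ p.2 = [])
instance (D : List (String × List String)) (ger : List String) (pizza_list : List (List String × List String)) : Decidable (Pre_ger_check D ger pizza_list) := by unfold Pre_ger_check; infer_instance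

def pvWitness_ger_check : (List (String × List String)) × List String × (List (List String × List String)) :=
  ([("salami", ["salami", "ham"]), ("ananas", ["pineapple"])], ["ananas"], [(["ananas"], ["pineapple"]), (["salami"], ["ham"])])

-- On a German ingredient missing from D that some pizza (not listing it) would prune against, A raises
-- KeyError; B skips the missing key and returns D unchanged there.
def Raises_ger_check (D : List (String × List String)) (ger : List String) (pizza_list : List (List String × List String)) : Prop :=
  ∃ g ∈ ger, g ∉ D.map Prod.fst ∧ ∃ p ∈ pizza_list, g ∉ p.1 ∧ p.2 ≠ []
instance (D : List (String × List String)) (ger : List String) (pizza_list : List (List String × List String)) : Decidable (Raises_ger_check D ger pizza_list) := by unfold Raises_ger_check; infer_instance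

def pvRaiseWitness_ger_check : (List (String × List String)) × List String × (List (List String × List String)) :=
  ([], ["ananas"], [([], ["pineapple"])])
def pvRaiseWitnessOut_ger_check : List (String × List String) := []

def Spec_ger_check (D : List (String × List String)) (ger : List String) (pizza_list : List (List String × List String)) (out : List (String × List String)) : Prop := out = ger_check_alt D ger pizza_list
instance (D : List (String × List String)) (ger : List String) (pizza_list : List (List String × List String)) (out : List (String × List String)) : Decidable (Spec_ger_check D ger pizza_list out) := by unfold Spec_ger_check; infer_instance

-- ===== CLAIM (what is proved, stated in full; the proofs are below) =====
def Claim_raises_ger_check : Prop := (∀ (D : List (String × List String)) (ger : List String) (pizza_list : List (List String × List String)), Dom_ger_check D ger pizza_list → Raises_ger_check D ger pizza_list → ¬ Pre_ger_check D ger pizza_list) ∧ (Dom_ger_check (pvRaiseWitness_ger_check.1) (pvRaiseWitness_ger_check.2.1) (pvRaiseWitness_ger_check.2.2) ∧ Raises_ger_check (pvRaiseWitness_ger_check.1) (pvRaiseWitness_ger_check.2.1) (pvRaiseWitness_ger_check.2.2) ∧ ger_check_alt (pvRaiseWitness_ger_check.1) (pvRaiseWitness_ger_check.2.1) (pvRaiseWitness_ger_check.2.2)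 = pvRaiseWitnessOut_ger_check)

def Claim_equal_ger_check : Prop := ∀ (D : List (String × List String)) (ger : List String) (pizza_list : List (List String × List String)), Dom_ger_check D ger pizza_list → Pre_ger_check D ger pizza_list → Spec_ger_check D ger pizza_list (ger_check D ger pizza_list)

-- ===== LEMMAS AND PROOFS =====

lemma replace_eq_self (g : String) (v : List String) :
    ∀ (l : List (String × List String)), (l.map Prod.fst).Nodup →
    ((l.find? (fun p => p.1 == g)).map (fun p => p.2)) = some v →
    l.map (fun p => if p.1 == g then (g, v) else p) = l := by
  intro l
  induction l with
  | nil => intro _ h; simp at h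
  | cons a l ih =>
    intro hnd hf
    by_cases hb : (a.1 == g) = true
    · rw [List.find?_cons_of_pos (p := fun p => p.1 == g) (a := a) (l := l) hb] at hf
      simp at hf
      have hag : a.1 = g := by simpa using hb
      have hnotin : ∀ p ∈ l, (p.1 == g) = false := by
        intro p hp
        simp only [List.map_cons, List.nodup_cons] at hnd
        have hm : p.1 ∈ l.map Prod.fst := List.mem_map_of_mem hp
        rw [beq_eq_false_iff_ne]
        intro hpg
        exact hnd.1 (by rw [hag, ← hpg]; exact hm)
      have hrest : l.map (fun p => if p.1 == g then (g, v) else p) = l := by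
        rw [List.map_congr_left (g := id) (fun p hp => by simp [hnotin p hp]), List.map_id]
      simp only [List.map_cons, hrest]
      have hhead : (if (a.1 == g) = true then (g, v) else a) = a := by
        rw [if_pos hb, ← hag, ← hf]
      rw [hhead]
    · rw [List.find?_cons_of_neg (p := fun p => p.1 == g) (a := a) (l := l) (by simpa using hb)] at hf
      simp only [List.map_cons, List.nodup_cons] at hnd
      simp only [List.map_cons, if_neg hb, ih hnd.2 hf]

lemma contains_of_get? (d : PySem.Dict String (List String)) (g : String) (v : List String)
    (hg : d.get? g = some v) : d.contains g = true := by
  obtain ⟨l⟩ := d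
  simp only [PySem.Dict.get?] at hg
  simp only [PySem.Dict.contains]
  obtain ⟨pr, hpr⟩ := Option.map_eq_some_iff.mp hg
  have hp := List.find?_some hpr.1
  exact List.any_eq_true.mpr ⟨pr, List.mem_of_find?_eq_some hpr.1, hp⟩

lemma insert_self (d : PySem.Dict String (List String)) (g : String) (v : List String)
    (hnd : d.keys.Nodup) (hg : d.get? g = some v) : d.insert g v = d := by
  have hc := contains_of_get? d g v hg
  obtain ⟨l⟩ := d
  simp only [PySem.Dict.insert, hc, if_pos]
  apply PySem.Dict.ext
  exact replace_eq_self g v l hnd (by simpa [PySem.Dict.get?] using hg)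

lemma keys_insert_of_get? (d : PySem.Dict String (List String)) (g : String) (v w : List String)
    (hg : d.get? g = some w) : (d.insert g v).keys = d.keys := by
  have hc := contains_of_get? d g w hg
  obtain ⟨l⟩ := d
  simp only [PySem.Dict.insert, hc, if_pos, PySem.Dict.keys, List.map_map]
  apply List.map_congr_left
  intro p _
  by_cases h : p.1 = g
  · simp [h]
  · simp [h]

-- A's removal of one occurrence of e from a candidate list, at value level.
def step1 (v : List String) (e : String) : List String :=
  if v.contains e then (PySem.List.remove? v e).getD v else v

-- the candidate list after dropping, for each e, the first (r e) occurrences of e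
def dropCount : List String → (String → Int) → List String
  | [], _ => []
  | x :: xs, r => if r x > 0 then dropCount xs (fun y => if y = x then r x - 1 else r y)
                  else x :: dropCount xs r

-- the multiset of removal events for ger_ing g: English occurrences on pizzas not listing g
def events (g : String) (ps : List (List String × List String)) : List String :=
  ps.flatMap (fun i => if !(i.1.contains g) then i.2 else [])

lemma eng_fold (g : String) (es : List String) :
    ∀ (d : PySem.Dict String (List String)) (v : List String),
    d.keys.Nodup → d.get? g = some v →
    es.foldl (fun d e => gerRemoveStep d g e) d = d.insert g (es.foldl step1 v) := by
  induction es with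
  | nil =>
    intro d v hnd hg
    rw [List.foldl_nil, List.foldl_nil, insert_self d g v hnd hg]
  | cons e es ih =>
    intro d v hnd hg
    rw [List.foldl_cons, List.foldl_cons]
    have hstep : gerRemoveStep d g e = d.insert g (step1 v e) := by
      by_cases hv : v.contains e = true
      · simp [gerRemoveStep, hg, step1, List.contains_iff_mem.mp hv]
      · have hnmem : e ∉ v := fun h => hv (List.contains_iff_mem.mpr h)
        simp only [gerRemoveStep, hg, step1, hv, Bool.false_eq_true, if_false]
        rw [insert_self d g v hnd hg]
    rw [hstep, ih (d.insert g (step1 v e)) (step1 v e)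
          (by rw [keys_insert_of_get? d g _ v hg]; exact hnd)
          (PySem.Dict.get?_insert_self d g _),
        PySem.Dict.insert_insert_self]

lemma pizza_fold (g : String) (ps : List (List String × List String)) :
    ∀ (d : PySem.Dict String (List String)) (v : List String),
    d.keys.Nodup → d.get? g = some v →
    ps.foldl (fun d i =>
        if !(i.1.contains g) then i.2.foldl (fun d e => gerRemoveStep d g e) d else d) d
      = d.insert g (ps.foldl (fun v i => if !(i.1.contains g) then i.2.foldl step1 v else v) v) := by
  induction ps with
  | nil =>
    intro d v hnd hg
    rw [List.foldl_nil, List.foldl_nil, insert_self d g v hnd hg]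
  | cons p ps ih =>
    intro d v hnd hg
    rw [List.foldl_cons, List.foldl_cons]
    by_cases hc : p.1.contains g = true
    · simp only [hc, Bool.not_true, Bool.false_eq_true, if_false]
      exact ih d v hnd hg
    · simp only [hc, Bool.not_false, if_true]
      rw [eng_fold g p.2 d v hnd hg,
          ih (d.insert g (p.2.foldl step1 v)) (p.2.foldl step1 v)
            (by rw [keys_insert_of_get? d g _ v hg]; exact hnd)
            (PySem.Dict.get?_insert_self d g _),
          PySem.Dict.insert_insert_self]

lemma foldl_events (g : String) (ps : List (List String × List String)) :
    ∀ (v : List String),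
    ps.foldl (fun v i => if !(i.1.contains g) then i.2.foldl step1 v else v) v
      = (events g ps).foldl step1 v := by
  induction ps with
  | nil => intro v; rfl
  | cons p ps ih =>
    intro v
    rw [List.foldl_cons, events, List.flatMap_cons, List.foldl_append]
    by_cases hc : p.1.contains g = true
    · simp only [hc, Bool.not_true, Bool.false_eq_true, if_false, List.foldl_nil]
      exact ih v
    · simp only [hc, Bool.not_false, if_true]
      exact ih _

lemma getD_countFold (es : List String) :
    ∀ (rm : PySem.Dict String Int) (t : String),
    (es.foldl (fun rm e => rm.insert e (rm.getD e 0 + 1)) rm).getD t 0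
      = rm.getD t 0 + (es.count t : Int) := by
  induction es with
  | nil => intro rm t; simp
  | cons e es ih =>
    intro rm t
    rw [List.foldl_cons, ih]
    by_cases h : t = e
    · subst h
      rw [PySem.Dict.getD_insert_self, List.count_cons_self]
      push_cast
      ring
    · rw [PySem.Dict.getD_insert_of_ne _ _ _ h, List.count_cons_of_ne (Ne.symm h)]

lemma getD_remaining (g : String) (ps : List (List String × List String)) :
    ∀ (rm : PySem.Dict String Int) (t : String),
    (ps.foldl (fun rm i =>
        if !(i.1.contains g) then
          i.2.foldl (fun rm e => rm.insert e (rm.getD e 0 + 1)) rm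
        else rm) rm).getD t 0
      = rm.getD t 0 + ((events g ps).count t : Int) := by
  induction ps with
  | nil => intro rm t; simp [events]
  | cons p ps ih =>
    intro rm t
    rw [List.foldl_cons, events, List.flatMap_cons, List.count_append]
    by_cases hc : p.1.contains g = true
    · simp only [hc, Bool.not_true, Bool.false_eq_true, if_false, List.count_nil]
      rw [ih rm t, events]
      push_cast
      ring
    · simp only [hc, Bool.not_false, if_true]
      rw [ih _ t, getD_countFold, events]
      push_cast
      ring

lemma scan_spec (cand : List String) :
    ∀ (rm : PySem.Dict String Int) (out : List String),
    (cand.foldl (fun (st : PySem.Dict String Int × List String) e =>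
        if st.1.getD e 0 > 0 then (st.1.insert e (st.1.getD e 0 - 1), st.2)
        else (st.1, st.2 ++ [e])) (rm, out)).2
      = out ++ dropCount cand (fun e => rm.getD e 0) := by
  induction cand with
  | nil => intro rm out; simp [dropCount]
  | cons e cand ih =>
    intro rm out
    rw [List.foldl_cons]
    by_cases h : rm.getD e 0 > 0
    · rw [if_pos h]
      rw [ih (rm.insert e (rm.getD e 0 - 1)) out]
      have hf : (fun t => (rm.insert e (rm.getD e 0 - 1)).getD t 0)
          = (fun t => if t = e then rm.getD e 0 - 1 else rm.getD t 0) := by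
        funext t
        by_cases ht : t = e
        · subst ht; rw [PySem.Dict.getD_insert_self, if_pos rfl]
        · rw [PySem.Dict.getD_insert_of_ne _ _ _ ht, if_neg ht]
      rw [hf]
      simp only [dropCount, if_pos h]
    · rw [if_neg h, ih rm (out ++ [e])]
      simp only [dropCount, if_neg h, List.append_assoc, List.singleton_append]

lemma dropCount_congr : ∀ (v : List String) (r r' : String → Int),
    (∀ t ∈ v, r t = r' t) → dropCount v r = dropCount v r' := by
  intro v
  induction v with
  | nil => intro r r' _; rfl
  | cons x v ih =>
    intro r r' h
    have hx : r x = r' x := h x List.mem_cons_self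
    simp only [dropCount, hx]
    by_cases hp : r' x > 0
    · rw [if_pos hp, if_pos hp]
      apply ih
      intro t ht
      by_cases htx : t = x
      · simp [htx]
      · simp [htx, h t (List.mem_cons_of_mem _ ht)]
    · rw [if_neg hp, if_neg hp, ih r r' (fun t ht => h t (List.mem_cons_of_mem _ ht))]

lemma dropCount_nonpos : ∀ (v : List String) (r : String → Int),
    (∀ t ∈ v, r t ≤ 0) → dropCount v r = v := by
  intro v
  induction v with
  | nil => intro r _; rfl
  | cons x v ih =>
    intro r h
    have hx : ¬ r x > 0 := by have := h x List.mem_cons_self; omega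
    simp only [dropCount, if_neg hx]
    rw [ih r (fun t ht => h t (List.mem_cons_of_mem _ ht))]

lemma dropCount_step1 : ∀ (v : List String) (r : String → Int) (e : String), 0 ≤ r e →
    dropCount (step1 v e) r = dropCount v (fun t => if t = e then r e + 1 else r t) := by
  intro v
  induction v with
  | nil => intro r e _; simp [step1, dropCount]
  | cons x v ih =>
    intro r e hre
    by_cases hxe : x = e
    · have hs : step1 (x :: v) e = v := by
        simp [step1, ← hxe, PySem.List.remove?_cons_self]
      have hp : (if x = e then r e + 1 else r x) > 0 := by
        rw [if_pos hxe]; omega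
      rw [hs]
      simp only [dropCount, if_pos hp]
      apply dropCount_congr
      intro t _
      by_cases htx : t = x
      · rw [htx, if_pos rfl, if_pos hxe, hxe]
        ring
      · have hte : ¬ t = e := by rw [← hxe]; exact htx
        simp [htx, hte]
    · by_cases hev : e ∈ v
      · have hs : step1 (x :: v) e = x :: step1 v e := by
          have hm : e ∈ x :: v := List.mem_cons_of_mem _ hev
          simp only [step1, List.contains_iff_mem.mpr hm, List.contains_iff_mem.mpr hev, if_pos,
            PySem.List.remove?_eq_some_erase _ _ hm, PySem.List.remove?_eq_some_erase _ _ hev,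
            Option.getD_some]
          rw [List.erase_cons_tail (by simpa using hxe)]
        rw [hs]
        have hbump : (if x = e then r e + 1 else r x) = r x := by simp [hxe]
        simp only [dropCount, hbump]
        by_cases hp : r x > 0
        · rw [if_pos hp, if_pos hp]
          have hnex : ¬ (e = x) := fun h => hxe h.symm
          have hre' : 0 ≤ (fun y => if y = x then r x - 1 else r y) e := by
            simpa [hnex] using hre
          rw [ih _ e hre']
          apply dropCount_congr
          intro t _
          by_cases hte : t = e
          · simp [hte, hnex]
          · by_cases htx : t = x <;> simp [hte, htx, hxe]
        · rw [if_neg hp, if_neg hp, ih r e hre]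
      · have hnm : e ∉ x :: v := by
          intro h
          rcases List.mem_cons.mp h with h' | h'
          · exact hxe h'.symm
          · exact hev h'
        have hs : step1 (x :: v) e = x :: v := by
          have hc : ¬ ((x :: v).contains e = true) := fun h => hnm (List.contains_iff_mem.mp h)
          simp only [step1]
          rw [if_neg hc]
        rw [hs]
        apply dropCount_congr
        intro t ht
        have : t ≠ e := fun h => hnm (h ▸ ht)
        simp [this]

lemma foldl_step1_eq_dropCount : ∀ (es : List String) (v : List String),
    es.foldl step1 v = dropCount v (fun t => (es.count t : Int)) := by
  intro es
  induction es with
  | nil =>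
    intro v
    rw [List.foldl_nil, dropCount_nonpos v _ (by intro t _; simp)]
  | cons e es ih =>
    intro v
    rw [List.foldl_cons, ih (step1 v e),
        dropCount_step1 v _ e (by positivity)]
    apply dropCount_congr
    intro t _
    by_cases ht : t = e
    · subst ht
      rw [if_pos rfl, List.count_cons_self]
      push_cast
      ring
    · rw [if_neg ht, List.count_cons_of_ne (Ne.symm ht)]

lemma mk_get? (D : List (String × List String)) (g : String) (hg : g ∈ D.map Prod.fst) :
    ∃ p ∈ D, p.1 = g ∧ (PySem.Dict.mk D).get? g = some p.2 := by
  obtain ⟨x, hx, hbx⟩ := List.mem_map.mp hg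
  have hs : (D.find? (fun p => p.1 == g)).isSome :=
    List.find?_isSome.mpr ⟨x, hx, by simp [hbx]⟩
  obtain ⟨pr, hpr⟩ := Option.isSome_iff_exists.mp hs
  refine ⟨pr, List.mem_of_find?_eq_some hpr, by simpa using List.find?_some hpr, ?_⟩
  simp [PySem.Dict.get?, hpr]

def altStep (pizza_list : List (List String × List String))
    (d : PySem.Dict String (List String)) (ger_ing : String) : PySem.Dict String (List String) :=
  match d.get? ger_ing with
  | none => d
  | some cand =>
      let remaining := pizza_list.foldl (fun (rm : PySem.Dict String Int) i =>
          if !(i.1.contains ger_ing) then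
            i.2.foldl (fun rm eng_ing => rm.insert eng_ing (rm.getD eng_ing 0 + 1)) rm
          else rm)
        (PySem.Dict.empty : PySem.Dict String Int)
      let scan := cand.foldl (fun (st : PySem.Dict String Int × List String) e =>
          if st.1.getD e 0 > 0 then (st.1.insert e (st.1.getD e 0 - 1), st.2)
          else (st.1, st.2 ++ [e]))
        (remaining, [])
      d.insert ger_ing scan.2

lemma altStep_eq (pizza_list : List (List String × List String))
    (d : PySem.Dict String (List String)) (g : String) (v : List String)
    (hv : d.get? g = some v) :
    altStep pizza_list d g
      = d.insert g (pizza_list.foldl (fun v i => if !(i.1.contains g) then i.2.foldl step1 v else v) v) := by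
  unfold altStep
  rw [hv]
  dsimp only
  rw [scan_spec, List.nil_append, foldl_events, foldl_step1_eq_dropCount]
  congr 1
  apply dropCount_congr
  intro t _
  rw [getD_remaining]
  simp

lemma pizza_fold_noop (g : String) (ps : List (List String × List String))
    (hno : ∀ p ∈ ps, g ∈ p.1 ∨ p.2 = []) :
    ∀ (d : PySem.Dict String (List String)),
    ps.foldl (fun d i =>
        if !(i.1.contains g) then i.2.foldl (fun d e => gerRemoveStep d g e) d else d) d = d := by
  induction ps with
  | nil => intro d; rfl
  | cons p ps ih =>
    intro d
    rw [List.foldl_cons]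
    have ih' := ih (fun q hq => hno q (List.mem_cons_of_mem _ hq))
    by_cases hc : p.1.contains g = true
    · simp only [hc, Bool.not_true, Bool.false_eq_true, if_false]
      exact ih' d
    · have h2 : p.2 = [] := by
        rcases hno p List.mem_cons_self with h | h
        · exact absurd (List.contains_iff_mem.mpr h) hc
        · exact h
      simp only [hc, Bool.not_false, if_true, h2, List.foldl_nil]
      exact ih' d

lemma outer_fold (pizza_list : List (List String × List String)) (ger : List String) :
    ∀ (d : PySem.Dict String (List String)),
    d.keys.Nodup →
    (∀ g ∈ ger, (∃ v, d.get? g = some v) ∨ ∀ p ∈ pizza_list, g ∈ p.1 ∨ p.2 = []) →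
    ger.foldl (fun d ger_ing =>
        pizza_list.foldl (fun d i =>
          if !(i.1.contains ger_ing) then
            i.2.foldl (fun d eng_ing => gerRemoveStep d ger_ing eng_ing) d
          else d) d) d
      = ger.foldl (altStep pizza_list) d := by
  induction ger with
  | nil => intro d _ _; rfl
  | cons g ger ih =>
    intro d hnd hvals
    rw [List.foldl_cons, List.foldl_cons]
    rcases hv : d.get? g with _ | v
    · have hno : ∀ p ∈ pizza_list, g ∈ p.1 ∨ p.2 = [] := by
        rcases hvals g List.mem_cons_self with ⟨v, hsome⟩ | h
        · rw [hv] at hsome; exact absurd hsome (by simp)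
        · exact h
      rw [pizza_fold_noop g pizza_list hno d]
      have hb : altStep pizza_list d g = d := by
        unfold altStep; rw [hv]
      rw [hb]
      exact ih d hnd (fun g' hg' => hvals g' (List.mem_cons_of_mem _ hg'))
    · rw [pizza_fold g pizza_list d v hnd hv, altStep_eq pizza_list d g v hv]
      apply ih
      · rw [keys_insert_of_get? d g _ v hv]; exact hnd
      · intro g' hg'
        rcases hvals g' (List.mem_cons_of_mem _ hg') with ⟨v', hv'⟩ | h
        · by_cases hgg : g' = g
          · subst hgg
            exact Or.inl ⟨_, PySem.Dict.get?_insert_self d g' _⟩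
          · exact Or.inl ⟨v', by rw [PySem.Dict.get?_insert_of_ne d _ hgg]; exact hv'⟩
        · exact Or.inr h

-- ===== VERDICT (by name: the statement is the Claim_ definition above) =====
theorem ger_check_spec : Claim_equal_ger_check := by
  unfold Claim_equal_ger_check
  intro D ger pizza_list _ hpre
  unfold Spec_ger_check ger_check ger_check_alt
  apply congrArg PySem.Dict.items
  apply outer_fold pizza_list ger
  · exact hpre.1
  · intro g hg
    rcases hpre.2 g hg with hk | hno
    · obtain ⟨p, hp, hp1, hget⟩ := mk_get? D g hk
      exact Or.inl ⟨p.2, hget⟩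
    · exact Or.inr hno

@[simp] theorem ger_check_raises : Claim_raises_ger_check := by
  unfold Claim_raises_ger_check
  refine ⟨?_, by decide⟩
  rintro D ger pizza_list _ ⟨g, hg, hnk, p, hp, hgp, hne⟩ ⟨_, hall⟩
  rcases hall g hg with hk | hno
  · exact hnk hk
  · rcases hno p hp with h | h
    · exact hgp h
    · exact hne h
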